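-- pv_equiv track=rewrite | github.com/chatasweetie/whiteboarding-and-coding-problems | questions/coins/solution/coins_arcy.py | coins_dp
-- ===== SOURCE A (Python) =====
-- def coins_dp(num_coins):
--     # dp[i] = set of amounts possible with i coins
--     dp = [set() for _ in range(num_coins + 1)]
--     dp[0] = {0}
--
--     for i in range(1, num_coins + 1):
--         for prev_amount in dp[i-1]:
--             dp[i].add(prev_amount + 1)  # add penny
--             dp[i].add(prev_amount + 10) # add dime
--
--     return dp[num_coins]
-- ===== SOURCE B (Python) =====
-- def coins_dp(num_coins):
--     # With i pennies replaced by dimes among num_coins coins, the total is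
--     # num_coins + 9*k; every k in 0..num_coins is reachable, so the set is closed-form.
--     return {num_coins + 9 * k for k in range(num_coins + 1)}
-- ===== Notes on version B (the rewrite author's own statement) =====
-- stated objective: faster
-- what changed: Replaces the quadratic DP over sets of amounts by the closed form {num_coins + 9*k : 0 <= k <= num_coins}, built in one comprehension.
import Mathlib
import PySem

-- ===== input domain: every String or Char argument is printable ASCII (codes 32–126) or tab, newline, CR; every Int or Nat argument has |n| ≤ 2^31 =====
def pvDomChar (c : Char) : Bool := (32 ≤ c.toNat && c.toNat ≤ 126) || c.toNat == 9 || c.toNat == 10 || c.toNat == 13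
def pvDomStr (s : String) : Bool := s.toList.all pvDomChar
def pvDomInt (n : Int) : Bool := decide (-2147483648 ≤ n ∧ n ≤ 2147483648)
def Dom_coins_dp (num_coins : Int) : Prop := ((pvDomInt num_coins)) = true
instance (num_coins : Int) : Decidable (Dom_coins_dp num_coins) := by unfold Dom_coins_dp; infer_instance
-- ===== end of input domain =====

-- B replaces A's quadratic DP over sets by the closed form {num_coins + 9*k : 0 ≤ k ≤ num_coins} (asymptotically faster).

-- ===== PORT A =====
-- one iteration of A's outer loop: dp[i] built by adding a penny and a dime to every amount of dp[i-1]
def coinsStep (prev : PySem.Set Int) : PySem.Set Int :=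
  List.foldl (fun s p => PySem.Set.add (PySem.Set.add s (p + 1)) (p + 10)) PySem.Set.empty prev

def coins_dp (num_coins : Int) : List Int :=
  (PySem.List.pyRange 1 (num_coins + 1) 1).foldl
    (fun prev _i => coinsStep prev) (PySem.Set.ofList [(0 : Int)])

-- ===== PORT B =====
def coins_dp_alt (num_coins : Int) : List Int :=
  PySem.Set.ofList ((PySem.List.pyRange 0 (num_coins + 1) 1).map (fun k => num_coins + 9 * k))

-- ===== PRECONDITION & SPEC =====
-- A raises IndexError for num_coins < 0 (dp is the empty list when it assigns dp[0]).
def Pre_coins_dp (num_coins : Int) : Prop := 0 ≤ num_coins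
instance (num_coins : Int) : Decidable (Pre_coins_dp num_coins) := by unfold Pre_coins_dp; infer_instance
def pvWitness_coins_dp : Int := 3

def Spec_coins_dp (num_coins : Int) (out : List Int) : Prop := out = coins_dp_alt num_coins
instance (num_coins : Int) (out : List Int) : Decidable (Spec_coins_dp num_coins out) := by unfold Spec_coins_dp; infer_instance

-- ===== CLAIM (what is proved, stated in full; the proofs are below) =====
def Claim_equal_coins_dp : Prop := ∀ (num_coins : Int), Dom_coins_dp num_coins → Pre_coins_dp num_coins → Spec_coins_dp num_coins (coins_dp num_coins)

-- ===== LEMMAS AND PROOFS =====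

-- the arithmetic progression a, a+9, …, a+9*(m-1): the set dp[i] is pvL i (i+1)
def pvL (a : Int) (m : Nat) : List Int := (List.range m).map (fun k : Nat => a + 9 * (k : Int))

theorem pvL_succ (a : Int) (m : Nat) : pvL a (m + 1) = pvL a m ++ [a + 9 * (m : Int)] := by
  simp [pvL, List.range_succ]

theorem pvL_cons (a : Int) (m : Nat) : pvL a (m + 1) = a :: pvL (a + 9) m := by
  unfold pvL
  rw [List.range_succ_eq_map, List.map_cons, List.map_map]
  simp only [Nat.cast_zero, mul_zero, add_zero]
  congr 1
  apply List.map_congr_left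
  intro k _
  simp [Function.comp]
  ring

theorem mem_pvL (x a : Int) (m : Nat) : x ∈ pvL a m ↔ ∃ k : Nat, k < m ∧ a + 9 * (k : Int) = x := by
  simp [pvL]

theorem nodup_pvL (a : Int) (m : Nat) : (pvL a m).Nodup := by
  unfold pvL
  apply List.Nodup.map _ List.nodup_range
  intro k l h
  simp at h
  omega

theorem pv_fold_aux (m : Nat) : ∀ (t : Nat) (a : Int), 1 ≤ t →
    List.foldl (fun s p => PySem.Set.add (PySem.Set.add s (p + 1)) (p + 10))
      (pvL (a + 1) (t + 1)) (pvL (a + 9 * (t : Int)) m)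
    = pvL (a + 1) (t + 1 + m) := by
  induction m with
  | zero => intro t a _; simp [pvL]
  | succ m ih =>
    intro t a ht
    rw [pvL_cons (a + 9 * (t : Int)) m, List.foldl_cons]
    have h1 : PySem.Set.add (pvL (a + 1) (t + 1)) (a + 9 * (t : Int) + 1) = pvL (a + 1) (t + 1) := by
      apply PySem.Set.add_of_mem
      rw [mem_pvL]
      exact ⟨t, by omega, by ring⟩
    have h2 : PySem.Set.add (pvL (a + 1) (t + 1)) (a + 9 * (t : Int) + 10)
        = pvL (a + 1) (t + 1 + 1) := by
      rw [PySem.Set.add_of_not_mem, pvL_succ (a + 1) (t + 1)]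
      · have he : a + 9 * (t : Int) + 10 = a + 1 + 9 * ((t + 1 : Nat) : Int) := by push_cast; ring
        rw [he]
      · rw [mem_pvL]
        rintro ⟨k, hk, he⟩
        omega
    rw [h1, h2]
    have h3 : a + 9 * (t : Int) + 9 = a + 9 * ((t + 1 : Nat) : Int) := by push_cast; ring
    rw [h3, ih (t + 1) a (by omega)]
    congr 1
    omega

theorem coinsStep_pvL (a : Int) (m : Nat) : coinsStep (pvL a (m + 1)) = pvL (a + 1) (m + 2) := by
  unfold coinsStep
  rw [pvL_cons a m, List.foldl_cons]
  have e1 : PySem.Set.add (PySem.Set.empty) (a + 1) = [a + 1] := by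
    rw [PySem.Set.add_of_not_mem (by simp [PySem.Set.empty])]
    simp [PySem.Set.empty]
  have e2 : PySem.Set.add [a + 1] (a + 10) = [a + 1, a + 10] := by
    rw [PySem.Set.add_of_not_mem (by simp)]
    rfl
  have h0 : PySem.Set.add (PySem.Set.add (PySem.Set.empty) (a + 1)) (a + 10) = pvL (a + 1) 2 := by
    rw [e1, e2]
    simp [pvL, List.range_succ]
    omega
  rw [h0]
  have h9 : a + 9 = a + 9 * ((1 : Nat) : Int) := by push_cast; ring
  rw [h9, pv_fold_aux m 1 a (by omega)]
  congr 1
  omega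

theorem pv_outer (l : List Int) : ∀ (i : Nat),
    List.foldl (fun prev _i => coinsStep prev) (pvL (i : Int) (i + 1)) l
    = pvL ((i + l.length : Nat) : Int) (i + l.length + 1) := by
  induction l with
  | nil => intro i; simp
  | cons x xs ih =>
    intro i
    rw [List.foldl_cons]
    have hs : coinsStep (pvL (i : Int) (i + 1)) = pvL (((i + 1 : Nat) : Int)) (i + 1 + 1) := by
      have hc : ((i + 1 : Nat) : Int) = (i : Int) + 1 := by push_cast; ring
      rw [hc]
      exact coinsStep_pvL (i : Int) i
    rw [hs, ih (i + 1)]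
    congr 1
    · simp only [List.length_cons]; push_cast; ring
    · simp only [List.length_cons]; omega

theorem coins_dp_eq_pvL (n : Int) (hn : 0 ≤ n) : coins_dp n = pvL ((n.toNat : Nat) : Int) (n.toNat + 1) := by
  unfold coins_dp
  have h0 : PySem.Set.ofList [(0 : Int)] = pvL ((0 : Nat) : Int) (0 + 1) := by
    simp [PySem.Set.ofList, PySem.Set.add, PySem.Set.empty, pvL]
  rw [h0, pv_outer]
  have hl : (PySem.List.pyRange 1 (n + 1) 1).length = n.toNat := by
    rw [PySem.List.length_pyRange_one]; omega
  rw [hl]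
  congr 1
  · push_cast; ring
  · omega

theorem coins_dp_alt_eq_pvL (n : Int) (hn : 0 ≤ n) :
    coins_dp_alt n = pvL n (n.toNat + 1) := by
  unfold coins_dp_alt
  have hr : (PySem.List.pyRange 0 (n + 1) 1).map (fun k => n + 9 * k) = pvL n (n.toNat + 1) := by
    rw [PySem.List.pyRange_one, List.map_map]
    unfold pvL
    have hm : (n + 1 - 0).toNat = n.toNat + 1 := by omega
    rw [hm]
    apply List.map_congr_left
    intro k _
    simp [Function.comp]
  rw [hr]
  exact PySem.Set.ofList_eq_self_of_nodup _ (nodup_pvL _ _)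

-- ===== VERDICT (by name: the statement is the Claim_ definition above) =====
theorem coins_dp_spec : Claim_equal_coins_dp := by
  intro n _ hpre
  unfold Spec_coins_dp
  rw [coins_dp_eq_pvL n hpre, coins_dp_alt_eq_pvL n hpre, Int.toNat_of_nonneg hpre]
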